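-- pv_equiv track=rewrite | github.com/carokhan/Reefscape | superstructure.py | get_prioritized_state
-- ===== SOURCE A (Python) =====
-- def get_prioritized_state(result_states):
--     """
--     Given a list of result states, return the highest-priority state.
--     Priority is given to 'score', 'transfer', and 'prescore' states over 'ready' states.
--
--     :param result_states: List of result states.
--     :return: The highest-priority state as a string.
--     """
--     # Priority order (higher priority means earlier in the list)
--     priority_order = [
--         "CORAL_SCORE_",  # Score states have the highest priority
--         "CORAL_TRANSFER", # Transfer comes next
--         "CORAL_PRESCORE", # Prescore comes next
--         "ALGAE_INTAKE",   # Algae intake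
--         "ALGAE_PRESCORE_AP", # Prescore for algae with processor alignment
--         "ALGAE_PRESCORE_AN", # Prescore for algae with net alignment
--         "CORAL_PREINTAKE",
--         "CORAL_READY",    # Ready states come after transfer, score, and prescore
--         "ALGAE_READY",    # Ready states are of equal priority
--         "IDLE"            # Idle state has the lowest priority
--     ]
--
--     # Sort result states based on priority order
--     for state in priority_order:
--         for result_state in result_states:
--             if state in result_state:
--                 return result_state
--
--     # If no state matches the priority order, return an empty string (or None, depending on your preference)
--     return ""
-- ===== SOURCE B (Python) =====
-- def get_prioritized_state(result_states):
--     """Single pass over result_states: each state gets a priority rank (index of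
--     the first priority key it contains, len = no match); keep the first state
--     with the strictly smallest rank; return it, or "" if nothing matched."""
--     priority_order = [
--         "CORAL_SCORE_",
--         "CORAL_TRANSFER",
--         "CORAL_PRESCORE",
--         "ALGAE_INTAKE",
--         "ALGAE_PRESCORE_AP",
--         "ALGAE_PRESCORE_AN",
--         "CORAL_PREINTAKE",
--         "CORAL_READY",
--         "ALGAE_READY",
--         "IDLE",
--     ]
--     best_rank = len(priority_order)
--     best = ""
--     for state in result_states:
--         rank = len(priority_order)
--         for i, key in enumerate(priority_order):
--             if key in state:
--                 rank = i
--                 break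
--         if rank < best_rank:
--             best_rank = rank
--             best = state
--     return best
-- ===== Notes on version B (the rewrite author's own statement) =====
-- stated objective: alternative
-- what changed: Replaced A's nested scan (for each priority key, rescan the whole states list) by a single pass over the states that computes each state's priority rank once and keeps the first state with the strictly smallest rank; same value, including ties (earliest state wins) and the all-miss empty-string case.
import Mathlib
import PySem

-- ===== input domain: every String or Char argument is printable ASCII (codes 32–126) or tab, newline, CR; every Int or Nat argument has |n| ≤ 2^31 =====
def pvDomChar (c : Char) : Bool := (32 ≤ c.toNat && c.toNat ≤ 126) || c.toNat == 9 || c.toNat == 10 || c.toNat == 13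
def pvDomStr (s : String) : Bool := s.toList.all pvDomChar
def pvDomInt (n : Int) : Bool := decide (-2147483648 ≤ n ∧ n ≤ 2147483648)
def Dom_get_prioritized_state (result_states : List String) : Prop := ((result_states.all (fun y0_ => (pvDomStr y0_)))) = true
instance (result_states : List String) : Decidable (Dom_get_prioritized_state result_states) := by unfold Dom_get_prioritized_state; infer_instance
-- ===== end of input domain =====

-- ===== PORT A =====
-- B replaces A's priority-key-outer / states-inner double scan by a single pass over
-- the states keeping the best (rank, earliest) state; same return value everywhere.

-- the priority_order list literal both Pythons define
def pvPriorityOrder : List String :=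
  ["CORAL_SCORE_", "CORAL_TRANSFER", "CORAL_PRESCORE", "ALGAE_INTAKE",
   "ALGAE_PRESCORE_AP", "ALGAE_PRESCORE_AN", "CORAL_PREINTAKE",
   "CORAL_READY", "ALGAE_READY", "IDLE"]

-- A's inner loop: first result_state containing `state` (the key), if any
def pvAFind (key : String) (states : List String) : Option String :=
  match states with
  | [] => none
  | s :: rest => if PySem.Str.isIn key s then some s else pvAFind key rest

-- A's outer loop over the priority keys
def pvALoop (keys states : List String) : String :=
  match keys with
  | [] => ""
  | k :: rest =>
    match pvAFind k states with
    | some s => s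
    | none => pvALoop rest states

def get_prioritized_state (result_states : List String) : String :=
  pvALoop pvPriorityOrder result_states

-- ===== PORT B =====
-- Source B's inner loop: rank of a state = index of the first priority key contained
-- in it, keys.length if none
def pvRank (keys : List String) (s : String) : Nat :=
  match keys with
  | [] => 0
  | k :: rest => if PySem.Str.isIn k s then 0 else pvRank rest s + 1

-- Source B's single pass: acc = (best_rank, best), updated on strictly smaller rank
def pvBGo (keys : List String) (acc : Nat × String) (states : List String) : Nat × String :=
  match states with
  | [] => acc
  | s :: rest =>
    pvBGo keys (if pvRank keys s < acc.1 then (pvRank keys s, s) else acc) rest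

def get_prioritized_state_alt (result_states : List String) : String :=
  (pvBGo pvPriorityOrder (pvPriorityOrder.length, "") result_states).2

-- ===== PRECONDITION & SPEC =====
def Spec_get_prioritized_state (result_states : List String) (out : String) : Prop := out = get_prioritized_state_alt result_states
instance (result_states : List String) (out : String) : Decidable (Spec_get_prioritized_state result_states out) := by unfold Spec_get_prioritized_state; infer_instance

-- ===== CLAIM (what is proved, stated in full; the proofs are below) =====
def Claim_equal_get_prioritized_state : Prop := ∀ (result_states : List String), Dom_get_prioritized_state result_states → Spec_get_prioritized_state result_states (get_prioritized_state result_states)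

-- ===== LEMMAS AND PROOFS =====

-- once best_rank = 0 nothing updates (the update needs a strictly smaller rank)
theorem pvBGo_zero (keys : List String) (bs : String) :
    ∀ states : List String, pvBGo keys (0, bs) states = (0, bs) := by
  intro states
  induction states with
  | nil => rfl
  | cons s rest ih => simp [pvBGo, ih]

-- one priority key peeled off: if some state contains k the pass locks onto the
-- first such state with rank 0; otherwise every rank (and the initial best_rank)
-- is one more than with the remaining keys, so the pass tracks the shorter one.
theorem pvBGo_cons (k : String) (keys : List String) :
    ∀ (states : List String) (br : Nat) (bs : String),
      pvBGo (k :: keys) (br + 1, bs) states =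
        match pvAFind k states with
        | some s => (0, s)
        | none => ((pvBGo keys (br, bs) states).1 + 1, (pvBGo keys (br, bs) states).2) := by
  intro states
  induction states with
  | nil => intro br bs; rfl
  | cons s rest ih =>
    intro br bs
    cases hk : PySem.Chars.isIn k.toList s.toList with
    | true => simp [pvBGo, pvAFind, pvRank, hk, pvBGo_zero]
    | false =>
      by_cases hlt : pvRank keys s < br
      · simpa [pvBGo, pvAFind, pvRank, hk, hlt, Nat.succ_lt_succ_iff] using ih (pvRank keys s) s
      · simpa [pvBGo, pvAFind, pvRank, hk, hlt, Nat.succ_lt_succ_iff] using ih br bs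

-- main invariant: A's double loop equals B's single pass, for any key list
theorem pvALoop_eq_pvBGo (keys : List String) :
    ∀ states : List String,
      pvALoop keys states = (pvBGo keys (keys.length, "") states).2 := by
  induction keys with
  | nil =>
    intro states
    induction states with
    | nil => rfl
    | cons s rest ih => simpa [pvALoop, pvBGo, pvRank] using ih
  | cons k rest ih =>
    intro states
    rw [show (k :: rest).length = rest.length + 1 from rfl, pvBGo_cons]
    cases h : pvAFind k states with
    | some s => simp [pvALoop, h]
    | none => simp [pvALoop, h, ih states]

-- ===== VERDICT (by name: the statement is the Claim_ definition above) =====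
theorem get_prioritized_state_spec : Claim_equal_get_prioritized_state := by
  intro result_states _
  unfold Spec_get_prioritized_state get_prioritized_state get_prioritized_state_alt
  exact pvALoop_eq_pvBGo pvPriorityOrder result_states
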